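-- pv_equiv track=rewrite | github.com/TJMoffitt/CodeJam2022 | Round1A/Solutions/q1.py | main_function
-- ===== SOURCE A (Python) =====
-- import string
--
-- def exists_greater(letter,string):
--     currentletter = letter
--     string = letter + string
--
--     for index in range(0,len(string)):
--         try:
--             if string[index] < string[index+1]:
--                 return True
--             if string[index] == string[index+1]:
--                 pass
--             else:
--                 break
--         except:
--             return False
-- ##        if letter <= string[0] and string[index:].replace(letter,'') != '':
-- ##            return True
--     return False
--     for other_letter in string:
--         if currentletter < other_letter:
--             return True
--         currentletter == other_letter
-- ##        if not flipped and letter != other_letter: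
-- ##            flipped == True
-- ##        if ord(other_letter) > ord(letter) and flipped:
-- ##            return True
-- ##    if flipped == False:
-- ##        return True
--     return False
--
-- def main_function(inp_one,inp_two = 0, inp_three = 0, inp_four = 0):
--     newstring = ''
--     letterindex = -1
--     while True:
--         letterindex += 1
--         newstring += inp_one[letterindex]
--         if letterindex == len(inp_one) -1:
--             return newstring
--         letter = inp_one[letterindex]
--         if ord(letter) <= ord(inp_one[letterindex+1]) and exists_greater(letter,inp_one[letterindex+1:]):
--             newstring += letter
-- ===== SOURCE B (Python) =====
-- def main_function(inp_one, inp_two=0, inp_three=0, inp_four=0):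
--     # O(n): right-to-left precompute of "next strict change is an increase", then one pass.
--     n = len(inp_one)
--     up = [False] * n
--     for i in range(n - 2, -1, -1):
--         if inp_one[i + 1] > inp_one[i]:
--             up[i] = True
--         elif inp_one[i + 1] == inp_one[i]:
--             up[i] = up[i + 1]
--     out = []
--     for i in range(n):
--         out.append(inp_one[i])
--         if up[i]:
--             out.append(inp_one[i])
--     return ''.join(out)
-- ===== Notes on version B (the rewrite author's own statement) =====
-- stated objective: faster
-- what changed: A rescans the suffix at every position (exists_greater) to decide whether to duplicate the letter; B precomputes, right to left, a per-position flag saying whether the first strict change at or after that position is an increase, then emits the output in one left-to-right pass. Pre_ excludes only the empty string, on which A raises IndexError.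
import Mathlib
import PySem

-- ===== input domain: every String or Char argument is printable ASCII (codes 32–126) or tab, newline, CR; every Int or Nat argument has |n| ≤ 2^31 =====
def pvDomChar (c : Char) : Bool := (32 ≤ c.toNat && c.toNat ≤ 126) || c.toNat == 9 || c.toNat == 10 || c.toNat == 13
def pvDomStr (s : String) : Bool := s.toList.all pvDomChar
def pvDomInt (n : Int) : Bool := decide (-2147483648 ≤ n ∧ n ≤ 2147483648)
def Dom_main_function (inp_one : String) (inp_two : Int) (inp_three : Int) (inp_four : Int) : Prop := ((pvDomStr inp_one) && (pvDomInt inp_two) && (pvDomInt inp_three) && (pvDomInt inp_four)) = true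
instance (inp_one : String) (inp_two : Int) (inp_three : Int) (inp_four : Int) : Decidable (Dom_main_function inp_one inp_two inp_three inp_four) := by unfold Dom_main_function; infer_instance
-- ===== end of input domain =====

-- B replaces A's per-position rescan of the suffix (exists_greater) by a single right-to-left
-- precomputation of "the next strict change is an increase", then one left-to-right pass (O(n) vs O(n^2)).

-- ===== PORT A =====
-- exists_greater's for-loop over `letter + rest`: compares adjacent chars; increase → True,
-- equal → continue, decrease → break (False); index+1 out of range (try/except) → False.
def egLoop : List Char → Bool
  | a :: b :: t => if a < b then true else if a == b then egLoop (b :: t) else false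
  | _ => false

def exists_greater (letter : Char) (rest : List Char) : Bool :=
  egLoop (letter :: rest)

-- A's while-loop: letterindex walks forward; at each non-final index appends the char and,
-- if ord(letter) <= ord(next) and exists_greater(letter, suffix), appends it again; at the
-- final index appends the char and returns.  State = current char + remaining suffix.
def aLoop : Char → List Char → List Char
  | c, [] => [c]
  | c, d :: t =>
      c :: (if c ≤ d && exists_greater c (d :: t) then [c] else []) ++ aLoop d t

def main_function (inp_one : String) (inp_two : Int) (inp_three : Int) (inp_four : Int) : String :=
  match inp_one.toList with
  | [] => ""            -- A raises IndexError here (excluded by Pre_)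
  | c :: t => String.mk (aLoop c t)

-- ===== PORT B =====
-- up-flag per position, computed right to left: up[i] = true iff the first strict change at or
-- after position i is an increase (last position: false).
def upFlags : List Char → List Bool
  | [] => []
  | [_] => [false]
  | c :: d :: t =>
      let r := upFlags (d :: t)
      (if c < d then true else if c == d then r.headD false else false) :: r

-- single pass: emit each char, doubled where its flag is set
def emit : List Char → List Bool → List Char
  | c :: cs, b :: bs => (if b then [c, c] else [c]) ++ emit cs bs
  | _, _ => []

def main_function_alt (inp_one : String) (inp_two : Int) (inp_three : Int) (inp_four : Int) : String :=
  String.mk (emit inp_one.toList (upFlags inp_one.toList))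

-- ===== PRECONDITION & SPEC =====
-- Pre_ excludes only the empty string, on which A raises IndexError.
def Pre_main_function (inp_one : String) (inp_two : Int) (inp_three : Int) (inp_four : Int) : Prop :=
  inp_one ≠ ""
instance (inp_one : String) (inp_two : Int) (inp_three : Int) (inp_four : Int) : Decidable (Pre_main_function inp_one inp_two inp_three inp_four) := by unfold Pre_main_function; infer_instance
def pvWitness_main_function : String × Int × Int × Int := ("aab", 0, 0, 0)

def Spec_main_function (inp_one : String) (inp_two : Int) (inp_three : Int) (inp_four : Int) (out : String) : Prop := out = main_function_alt inp_one inp_two inp_three inp_four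
instance (inp_one : String) (inp_two : Int) (inp_three : Int) (inp_four : Int) (out : String) : Decidable (Spec_main_function inp_one inp_two inp_three inp_four out) := by unfold Spec_main_function; infer_instance

-- ===== CLAIM (what is proved, stated in full; the proofs are below) =====
def Claim_equal_main_function : Prop := ∀ (inp_one : String) (inp_two : Int) (inp_three : Int) (inp_four : Int), Dom_main_function inp_one inp_two inp_three inp_four → Pre_main_function inp_one inp_two inp_three inp_four → Spec_main_function inp_one inp_two inp_three inp_four (main_function inp_one inp_two inp_three inp_four)

-- ===== LEMMAS AND PROOFS =====

-- the head of the flag list is exactly exists_greater's verdict on the same suffix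
lemma eg_head : ∀ (t : List Char) (c : Char), egLoop (c :: t) = (upFlags (c :: t)).headD false := by
  intro t
  induction t with
  | nil => intro c; simp [egLoop, upFlags]
  | cons d t ih =>
      intro c
      simp only [egLoop, upFlags]
      by_cases h1 : c < d
      · simp [h1]
      · by_cases h2 : c = d
        · simp [h1, h2, ih]
        · simp [h1, h2]

-- A's duplication condition at each step equals B's precomputed flag
lemma cond_eq_flag (c d : Char) (t : List Char) :
    (c ≤ d && exists_greater c (d :: t)) = (upFlags (c :: d :: t)).headD false := by
  simp only [exists_greater, egLoop, upFlags]
  by_cases h1 : c < d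
  · simp [h1, le_of_lt h1]
  · by_cases h2 : c = d
    · subst h2
      simp [h1, eg_head]
    · have hnot : ¬ c ≤ d := by
        intro hle
        exact h2 (le_antisymm hle (not_lt.mp h1 : d ≤ c))
      simp [h1, h2, hnot]

-- main loop ↔ flags-then-emit
lemma aLoop_eq_emit : ∀ (t : List Char) (c : Char),
    aLoop c t = emit (c :: t) (upFlags (c :: t)) := by
  intro t
  induction t with
  | nil => intro c; simp [aLoop, upFlags, emit]
  | cons d t ih =>
      intro c
      have hu : upFlags (c :: d :: t)
          = (upFlags (c :: d :: t)).headD false :: upFlags (d :: t) := by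
        simp [upFlags]
      rw [aLoop, hu, emit, ← ih, ← cond_eq_flag]
      by_cases h : (c ≤ d && exists_greater c (d :: t)) = true
      · simp [h]
      · simp [h]

-- ===== VERDICT (by name: the statement is the Claim_ definition above) =====
theorem main_function_spec : Claim_equal_main_function := by
  intro s i2 i3 i4 _ hpre
  unfold Spec_main_function main_function main_function_alt
  cases hs : s.toList with
  | nil =>
      exact absurd (String.toList_eq_nil_iff.mp hs) hpre
  | cons c t => simp [hs, aLoop_eq_emit]
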